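-- pv_equiv track=rewrite | github.com/DragunWF/Competitive-Programming | CodeWars/python/7_kyu/cats_and_shelves.py | solution
-- ===== SOURCE A (Python) =====
-- def solution(start: int, finish: int) -> int:
--     steps = 0
--     current = start
--     while current < finish:
--         if current + 3 > finish:
--             current += 1
--         else:
--             current += 3
--         steps += 1
--     return steps
-- ===== SOURCE B (Python) =====
-- def solution(start: int, finish: int) -> int:
--     diff = max(0, finish - start)
--     return diff // 3 + diff % 3
-- ===== Notes on version B (the rewrite author's own statement) =====
-- stated objective: faster
-- what changed: Replaces the step-by-step while loop with a closed-form formula diff//3 + diff%3 on diff = max(0, finish-start).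
import Mathlib
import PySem

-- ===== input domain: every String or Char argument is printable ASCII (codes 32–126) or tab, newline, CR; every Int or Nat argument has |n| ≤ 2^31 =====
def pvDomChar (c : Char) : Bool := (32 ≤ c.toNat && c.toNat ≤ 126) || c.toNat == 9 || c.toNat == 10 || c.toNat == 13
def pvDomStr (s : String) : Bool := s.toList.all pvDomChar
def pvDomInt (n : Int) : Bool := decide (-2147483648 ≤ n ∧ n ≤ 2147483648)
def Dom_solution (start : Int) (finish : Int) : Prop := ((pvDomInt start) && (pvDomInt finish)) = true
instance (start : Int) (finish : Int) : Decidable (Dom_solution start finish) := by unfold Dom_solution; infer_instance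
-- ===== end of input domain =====

-- B replaces A's step-by-step while loop with the closed form diff//3 + diff%3 (O(1) vs O(finish-start)).


-- ===== PORT A =====
-- the while loop of A: state (current, steps); fuel = (finish - start).toNat bounds the
-- iteration count (each pass raises current by at least 1), making the loop total
def solutionLoop : Nat → Int → Int → Int → Int
  | 0, _, _, steps => steps
  | fuel + 1, finish, current, steps =>
    if current < finish then
      if current + 3 > finish then solutionLoop fuel finish (current + 1) (steps + 1)
      else solutionLoop fuel finish (current + 3) (steps + 1)
    else steps

def solution (start : Int) (finish : Int) : Int :=
  solutionLoop (finish - start).toNat finish start 0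

-- ===== PORT B =====
def solution_alt (start : Int) (finish : Int) : Int :=
  PySem.Int.floordiv (max 0 (finish - start)) 3 + PySem.Int.mod (max 0 (finish - start)) 3

-- ===== PRECONDITION & SPEC =====
def Spec_solution (start : Int) (finish : Int) (out : Int) : Prop := out = solution_alt start finish
instance (start : Int) (finish : Int) (out : Int) : Decidable (Spec_solution start finish out) := by unfold Spec_solution; infer_instance

-- ===== CLAIM (what is proved, stated in full; the proofs are below) =====
def Claim_equal_solution : Prop := ∀ (start : Int) (finish : Int), Dom_solution start finish → Spec_solution start finish (solution start finish)

-- ===== LEMMAS AND PROOFS =====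
-- loop invariant: with enough fuel the loop returns steps + (d/3 + d%3), d = max 0 (finish - current)
theorem solutionLoop_closed (fuel : Nat) (finish current steps : Int)
    (hf : (finish - current).toNat ≤ fuel) :
    solutionLoop fuel finish current steps
      = steps + (max 0 (finish - current)) / 3 + (max 0 (finish - current)) % 3 := by
  induction fuel generalizing current steps with
  | zero =>
    have h : ¬ current < finish := by omega
    simp [solutionLoop, show max 0 (finish - current) = 0 by omega]
  | succ fuel ih =>
    rw [solutionLoop]
    split_ifs with h1 h2
    · rw [ih (current + 1) (steps + 1) (by omega)]
      have hd : finish - current = 1 ∨ finish - current = 2 := by omega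
      rcases hd with hd | hd <;>
        rw [show max 0 (finish - (current + 1)) = finish - current - 1 by omega, hd] <;> omega
    · rw [ih (current + 3) (steps + 1) (by omega)]
      rw [show max 0 (finish - (current + 3)) = finish - current - 3 by omega,
          show max 0 (finish - current) = finish - current by omega]
      omega
    · rw [show max 0 (finish - current) = 0 by omega]
      omega

-- ===== VERDICT (by name: the statement is the Claim_ definition above) =====
theorem solution_spec : Claim_equal_solution := by
  intro start finish _
  unfold Spec_solution solution solution_alt
  rw [solutionLoop_closed _ _ _ _ (by omega),
      PySem.Int.floordiv_eq_ediv_of_pos (by norm_num),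
      PySem.Int.mod_eq_emod_of_pos (by norm_num)]
  omega
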